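-- pv_equiv track=rewrite | github.com/Nuthouse01/PMX-VMD-Scripting-Tools | mmd_scripting/overall_cleanup/translation_functions.py | piecewise_translate
-- ===== SOURCE A (Python) =====
-- from typing import TypeVar, List, Tuple, Dict
--
-- def is_alphanumeric(text:str) -> bool:
-- 	""" whole string is a-z,A-Z,0-9 """
-- 	# ord values [48-57, 65-90, 97-122, ]
-- 	# return all((48 <= ord(c) <= 57 or 65 <= ord(c) <= 90 or 97 <= ord(c) <= 122) for c in text)
-- 	for c in text:
-- 		o = ord(c)
-- 		if not (48 <= o <= 57 or 65 <= o <= 90 or 97 <= o <= 122): return False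
-- 	return True
--
-- STR_OR_STRLIST = TypeVar("STR_OR_STRLIST", str, List[str])
--
-- def piecewise_translate(in_list: STR_OR_STRLIST, in_dict: Dict[str,str], join_with_space=True) -> STR_OR_STRLIST:
-- 	"""
-- 	Apply piecewise translation to inputs when given a mapping dict.
-- 	Mapping dict will usually be the builtin comprehensive 'words_dict' or some results found from Google Translate.
-- 	From each position in the string(ordered), check each map entry(ordered). Dict should have keys ordered from longest
-- 	to shortest to avoid "undershadowing" problem.
-- 	Always returns what it produces, even if not a complete translation. Outer layers are responsible for checking if
-- 	the translation is "complete" before using it.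
--
-- 	:param in_list: list of JP strings, or a single JP string
-- 	:param in_dict: dict of mappings from JP substrings to EN substrings
-- 	:param join_with_space: optional, default true. if true, when substituting substrings, put spaces before/after.
-- 	:return: list of resulting strings, or a single resulting string
-- 	"""
-- 	input_is_str = isinstance(in_list, str)
-- 	if input_is_str: in_list = [in_list]  # force it to be a list anyway so I don't have to change my structure
-- 	outlist = []  # list to build & return
--
-- 	dictitems = list(in_dict.items())
--
-- 	joinchar = " " if join_with_space else ""
--
-- 	for out in in_list:
-- 		if (not out) or out.isspace():  # support bad/missing data
-- 			outlist.append("JP_NULL")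
-- 			continue
-- 		# goal: substrings that match keys of "words_dict" get replaced
-- 		# NEW ARCHITECTURE: starting from each char, try to match against the contents of the dict. longest items are first!
-- 		i = 0
-- 		while i < len(out):  # starting from each char of the string,
-- 			found_match = False
-- 			for (key, val) in dictitems:  # try to find anything in the dict to match against,
-- 				if out.startswith(key, i):  # and if something is found starting from 'i',
-- 					found_match = True
-- 					# i am going to replace it key->val, but first maybe insert space before or after or both.
-- 					# note: letter/number are the ONLY things that use joinchar. all punctuation and all JP stuff do not use joinchar.
-- 					# if 'begin-1' is a valid index and the char at that index is letter/number, then PREPEND a space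
-- 					before_space = joinchar if i != 0 and is_alphanumeric(out[i-1]) else ""
-- 					# if "begin+len(key)" is a valid index and the char at that index is letter/number, then APPEND a space
-- 					after_space = joinchar if i+len(key) < len(out) and is_alphanumeric(out[i+len(key)]) else ""
-- 					# now JOINCHAR is added, so now i substitute it
-- 					out = out[0:i] + before_space + val + after_space + out[i+len(key):]
-- 					# i don't need to examine or try to replace on any of these chars, so skip ahead a bit
-- 					i += len(val) + int(bool(before_space)) + int(bool(after_space))
-- 					# nothing else will match here, since I just replaced the thing, so break out of iterating on dict keys
-- 					break
-- 			if found_match is False: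
-- 				i += 1
-- 		# once all uses of all keys have been replaced, then append the result
-- 		outlist.append(out)
--
-- 	if input_is_str:	return outlist[0]	# if original input was a single string, then de-listify
-- 	else:				return outlist		# otherwise return as a list
-- ===== SOURCE B (Python) =====
-- def is_alphanumeric(text):
-- 	for c in text:
-- 		o = ord(c)
-- 		if not (48 <= o <= 57 or 65 <= o <= 90 or 97 <= o <= 122): return False
-- 	return True
--
-- def piecewise_translate(in_list, in_dict, join_with_space=True):
-- 	# B: one streaming pass building the output forward (no in-place splicing / index
-- 	# arithmetic), with the dict entries bucketed once by first character so each
-- 	# position only scans candidates that can possibly match.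
-- 	input_is_str = isinstance(in_list, str)
-- 	if input_is_str: in_list = [in_list]
-- 	buckets = {}
-- 	for key, val in in_dict.items():
-- 		if key:
-- 			buckets.setdefault(key[0], []).append((key, val))
-- 	joinchar = " " if join_with_space else ""
-- 	outlist = []
-- 	for s in in_list:
-- 		if (not s) or s.isspace():
-- 			outlist.append("JP_NULL")
-- 			continue
-- 		pieces = []
-- 		last = ""  # last character emitted so far
-- 		j = 0
-- 		n = len(s)
-- 		while j < n:
-- 			hit = None
-- 			for key, val in buckets.get(s[j], ()):
-- 				if s.startswith(key, j):
-- 					hit = (key, val)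
-- 					break
-- 			if hit is None:
-- 				pieces.append(s[j])
-- 				last = s[j]
-- 				j += 1
-- 			else:
-- 				key, val = hit
-- 				before = joinchar if last and is_alphanumeric(last) else ""
-- 				after = joinchar if j + len(key) < n and is_alphanumeric(s[j + len(key)]) else ""
-- 				piece = before + val + after
-- 				pieces.append(piece)
-- 				if piece: last = piece[-1]
-- 				j += len(key)
-- 		outlist.append("".join(pieces))
-- 	if input_is_str: return outlist[0]
-- 	return outlist
-- ===== Notes on version B (the rewrite author's own statement) =====
-- stated objective: faster
-- what changed: B replaces A's repeated in-place string splicing plus a scan of every dict entry at every position by a single forward streaming pass that appends to an output accumulator, with the dict entries bucketed once by first character so each position only tries the entries that can possibly match.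
-- outside the precondition, e.g. on piecewise_translate('a', {'a': 'x', '': 'y'}, True): A returns 'x', B returns 'x'; on piecewise_translate('ba', {'': 'y'}, True): A does not finish within the time limit, B returns 'ba'
import Mathlib
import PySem

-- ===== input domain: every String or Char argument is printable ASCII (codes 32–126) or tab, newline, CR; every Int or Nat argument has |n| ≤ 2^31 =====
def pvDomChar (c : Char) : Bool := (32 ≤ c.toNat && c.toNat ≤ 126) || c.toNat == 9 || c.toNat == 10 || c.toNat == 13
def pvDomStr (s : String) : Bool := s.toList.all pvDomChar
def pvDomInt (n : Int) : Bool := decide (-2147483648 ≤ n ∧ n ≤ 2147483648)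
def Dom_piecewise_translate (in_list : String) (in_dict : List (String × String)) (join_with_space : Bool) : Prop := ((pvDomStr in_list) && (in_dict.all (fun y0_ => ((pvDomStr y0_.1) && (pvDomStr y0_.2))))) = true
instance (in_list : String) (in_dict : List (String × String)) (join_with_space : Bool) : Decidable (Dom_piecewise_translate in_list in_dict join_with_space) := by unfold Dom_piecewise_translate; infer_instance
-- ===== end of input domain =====

-- B replaces A's in-place splice-and-reindex scan of the whole dict at every position by a
-- single forward streaming pass with the dict entries bucketed once by first character, so
-- each position only scans candidates that can possibly match (objective: faster, constant
-- factor; return values agree — neither version mutates its arguments).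

-- ===== PORT A =====
-- is_alphanumeric (module helper, used by both versions), on the char list of the string
def pvAlnum (cs : List Char) : Bool :=
  cs.all (fun c => (48 ≤ c.toNat && c.toNat ≤ 57) || (65 ≤ c.toNat && c.toNat ≤ 90) || (97 ≤ c.toNat && c.toNat ≤ 122))

-- A's while-loop: state = (current mutated string `out`, index i); fuel only makes the
-- recursion total (A loops forever on an empty key; Pre_ excludes that, and under Pre_
-- the initial fuel out.length+1 is never exhausted).
def pvALoop (dictitems : List (String × String)) (joinchar : List Char) :
    Nat → List Char → Nat → List Char
  | 0, out, _ => out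
  | fuel+1, out, i =>
    if i < out.length then
      match dictitems.find? (fun kv => kv.1.toList.isPrefixOf (out.drop i)) with
      | some (key, val) =>
        let before := if (!(i == 0)) && pvAlnum ((out.drop (i-1)).take 1) then joinchar else []
        let after := if (i + key.toList.length < out.length) &&
                        pvAlnum ((out.drop (i + key.toList.length)).take 1) then joinchar else []
        let out' := out.take i ++ before ++ val.toList ++ after ++ out.drop (i + key.toList.length)
        pvALoop dictitems joinchar fuel out' (i + val.toList.length + before.length + after.length)
      | none => pvALoop dictitems joinchar fuel out (i+1)
    else out

def piecewise_translate (in_list : String) (in_dict : List (String × String)) (join_with_space : Bool) : String :=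
  let out := in_list.toList
  if out.isEmpty || PySem.Chars.strIsspace out then "JP_NULL"
  else String.ofList (pvALoop in_dict (if join_with_space then [' '] else []) (out.length + 1) out 0)

-- ===== PORT B =====
-- buckets: first character of a (nonempty) key ↦ the dict entries starting with it, in dict order
def pvBuckets (in_dict : List (String × String)) : PySem.Dict Char (List (String × String)) :=
  ((in_dict.filter (fun kv => !kv.1.isEmpty)).map (fun kv => (kv.1.toList.headD ' ', kv))).foldl
    (fun d p => d.modify p.1 [] (· ++ [p.2])) PySem.Dict.empty

-- B's streaming loop: acc = output emitted so far (Source B's `pieces`/`last`: the last emitted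
-- character is acc.getLast?), tail = unread rest of the input string.
def pvBLoop (buckets : PySem.Dict Char (List (String × String))) (joinchar : List Char) :
    List Char → List Char → List Char
  | acc, [] => acc
  | acc, c :: rest =>
    match (buckets.getD c []).find? (fun kv => kv.1.toList.isPrefixOf (c :: rest)) with
    | none => pvBLoop buckets joinchar (acc ++ [c]) rest
    | some (key, val) =>
      let before := match acc.getLast? with
        | some lc => if pvAlnum [lc] then joinchar else []
        | none => []
      let rest' := rest.drop (key.length - 1)
      let after := match rest'.head? with
        | some nc => if pvAlnum [nc] then joinchar else []
        | none => []
      pvBLoop buckets joinchar (acc ++ before ++ val.toList ++ after) rest'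
  termination_by _ tail => tail.length
  decreasing_by all_goals (simp [List.length_drop]; try omega)

def piecewise_translate_alt (in_list : String) (in_dict : List (String × String)) (join_with_space : Bool) : String :=
  let out := in_list.toList
  if out.isEmpty || PySem.Chars.strIsspace out then "JP_NULL"
  else String.ofList (pvBLoop (pvBuckets in_dict) (if join_with_space then [' '] else []) [] out)

-- ===== PRECONDITION & SPEC =====
-- Pre_ excludes dicts containing an empty-string key (except when the string is empty or
-- all whitespace, where the dict is never consulted): whenever the empty key becomes the
-- first match, A's while-loop never terminates (i and len(out) grow in lockstep).
def Pre_piecewise_translate (in_list : String) (in_dict : List (String × String)) (join_with_space : Bool) : Prop :=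
  (∀ kv ∈ in_dict, kv.1 ≠ "") ∨ (in_list.toList.isEmpty || PySem.Chars.strIsspace in_list.toList) = true
instance (in_list : String) (in_dict : List (String × String)) (join_with_space : Bool) : Decidable (Pre_piecewise_translate in_list in_dict join_with_space) := by unfold Pre_piecewise_translate; infer_instance

def pvWitness_piecewise_translate : String × (List (String × String)) × Bool :=
  ("abcdef", [("cd", "X"), ("e", "")], true)

def Spec_piecewise_translate (in_list : String) (in_dict : List (String × String)) (join_with_space : Bool) (out : String) : Prop := out = piecewise_translate_alt in_list in_dict join_with_space
instance (in_list : String) (in_dict : List (String × String)) (join_with_space : Bool) (out : String) : Decidable (Spec_piecewise_translate in_list in_dict join_with_space out) := by unfold Spec_piecewise_translate; infer_instance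

-- ===== CLAIM (what is proved, stated in full; the proofs are below) =====
def Claim_equal_piecewise_translate : Prop := ∀ (in_list : String) (in_dict : List (String × String)) (join_with_space : Bool), Dom_piecewise_translate in_list in_dict join_with_space → Pre_piecewise_translate in_list in_dict join_with_space → Spec_piecewise_translate in_list in_dict join_with_space (piecewise_translate in_list in_dict join_with_space)

-- ===== LEMMAS AND PROOFS =====

theorem pv_buckets_getD (d : List (String × String)) (c : Char) :
    (pvBuckets d).getD c [] =
      d.filter (fun kv => !kv.1.isEmpty && (kv.1.toList.headD ' ' == c)) := by
  unfold pvBuckets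
  rw [PySem.Dict.getD_foldl_modify_append]
  simp [List.filter_map, Function.comp_def, List.filter_filter, Bool.and_comm]

theorem pv_find_filter {l : List (String × String)} {p q : (String × String) → Bool}
    (h : ∀ x ∈ l, p x = true → q x = true) :
    (l.filter q).find? p = l.find? p := by
  induction l with
  | nil => rfl
  | cons x xs ih =>
    have ih' := ih (fun y hy => h y (List.mem_cons_of_mem x hy))
    rw [List.filter_cons]
    by_cases hp : p x = true
    · have hq : q x = true := h x List.mem_cons_self hp
      simp [hq, List.find?, hp]
    · by_cases hq : q x = true <;> simp [hq, List.find?, hp, ih']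

theorem pv_before_eq (acc tail jc : List Char) :
    (if (!(acc.length == 0)) && pvAlnum (((acc ++ tail).drop (acc.length - 1)).take 1) then jc else []) =
      (match acc.getLast? with
        | some lc => if pvAlnum [lc] then jc else []
        | none => []) := by
  cases hacc : acc.getLast? with
  | none =>
    have : acc = [] := by simpa [List.getLast?_eq_none_iff] using hacc
    simp [this]
  | some lc =>
    obtain ⟨ys, rfl⟩ : ∃ ys, acc = ys ++ [lc] := by
      rcases List.getLast?_eq_some_iff.1 hacc with ⟨ys, h⟩
      exact ⟨ys, h⟩
    have h1 : (ys ++ [lc]).length - 1 = ys.length := by simp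
    rw [h1, List.append_assoc, List.drop_left]
    simp

theorem pv_loop_eq (items : List (String × String))
    (hkeys : ∀ kv ∈ items, kv.1 ≠ "") (jc : List Char) :
    ∀ fuel tail acc, tail.length < fuel →
      pvALoop items jc fuel (acc ++ tail) acc.length =
        pvBLoop (pvBuckets items) jc acc tail := by
  intro fuel
  induction fuel with
  | zero => intro tail acc h; omega
  | succ fuel ih =>
    intro tail acc hlt
    cases tail with
    | nil => simp [pvALoop, pvBLoop]
    | cons c rest =>
      have hguard : acc.length < (acc ++ c :: rest).length := by simp
      have hdrop : (acc ++ c :: rest).drop acc.length = c :: rest := List.drop_left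
      have hfind : items.find? (fun kv => kv.1.toList.isPrefixOf (c :: rest)) =
          ((pvBuckets items).getD c []).find? (fun kv => kv.1.toList.isPrefixOf (c :: rest)) := by
        rw [pv_buckets_getD, pv_find_filter]
        intro kv hkv hp
        have hne : kv.1.toList ≠ [] := fun hnil =>
          hkeys kv hkv (String.toList_eq_nil_iff.1 hnil)
        obtain ⟨k0, ks, hk⟩ := List.exists_cons_of_ne_nil hne
        rw [hk] at hp
        rw [List.isPrefixOf_iff_prefix, List.cons_prefix_cons] at hp
        have hkvne : kv.1.isEmpty = false := by
          cases he : kv.1.isEmpty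
          · rfl
          · exact absurd (by simpa [String.isEmpty_iff] using he) (hkeys kv hkv)
        simp [hk, hp.1, hkvne]
      rw [pvALoop]
      rw [if_pos hguard, hdrop, hfind]
      cases hmatch : ((pvBuckets items).getD c []).find? (fun kv => kv.1.toList.isPrefixOf (c :: rest)) with
      | none =>
        rw [pvBLoop, hmatch]
        have := ih rest (acc ++ [c]) (by simp at hlt ⊢; omega)
        simpa [List.append_assoc] using this
      | some kv =>
        obtain ⟨key, val⟩ := kv
        have hmem : (key, val) ∈ items := by
          have h1 := List.mem_of_find?_eq_some hmatch
          rw [pv_buckets_getD] at h1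
          exact List.mem_of_mem_filter h1
        have hkne : key.toList ≠ [] := fun hnil =>
          hkeys _ hmem (String.toList_eq_nil_iff.1 hnil)
        have hpre : key.toList.isPrefixOf (c :: rest) = true := by
          have := List.find?_some hmatch
          simpa using this
        have hklen : key.toList.length ≤ rest.length + 1 := by
          rw [List.isPrefixOf_iff_prefix] at hpre
          simpa using hpre.length_le
        have hkpos : 1 ≤ key.toList.length := by
          cases h : key.toList with
          | nil => exact absurd h hkne
          | cons a b => simp
        have hkL : key.toList.length = key.length := by simp
        rw [hkL] at hklen hkpos
        rw [pvBLoop, hmatch]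
        have hdrop2 : (acc ++ c :: rest).drop (acc.length + key.length) =
            rest.drop (key.length - 1) := by
          rw [List.drop_append]
          obtain ⟨m, hm⟩ : ∃ m, key.length = m + 1 := ⟨key.length - 1, by omega⟩
          simp [hm]
        have htake : (acc ++ c :: rest).take acc.length = acc := List.take_left
        have hbefore := pv_before_eq acc (c :: rest) jc
        have hafter : (if (acc.length + key.length < (acc ++ c :: rest).length) &&
              pvAlnum ((rest.drop (key.length - 1)).take 1) then jc else []) =
            (match (rest.drop (key.length - 1)).head? with
              | some nc => if pvAlnum [nc] then jc else []
              | none => []) := by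
          cases hr : rest.drop (key.length - 1) with
          | nil =>
            have : rest.length ≤ key.length - 1 := by
              have := congrArg List.length hr
              simp at this
              omega
            have hcond : ¬ (acc.length + key.length < (acc ++ c :: rest).length) := by
              simp
              omega
            simp
            intro h1 _
            exact absurd h1 (by omega)
          | cons nc tl =>
            have hlen : key.length - 1 < rest.length := by
              have := congrArg List.length hr
              simp at this
              omega
            have hcond : acc.length + key.length < (acc ++ c :: rest).length := by
              simp
              omega
            have hle : key.length ≤ rest.length := by omega
            simp [hle]
        dsimp only
        rw [hkL, htake, hdrop2, hbefore, hafter]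
        have hrec := ih (rest.drop (key.length - 1))
          (acc ++ (match acc.getLast? with
              | some lc => if pvAlnum [lc] then jc else []
              | none => []) ++ val.toList ++ (match (rest.drop (key.length - 1)).head? with
              | some nc => if pvAlnum [nc] then jc else []
              | none => []))
          (by simp at hlt ⊢; omega)
        have hlenarg : acc.length + val.toList.length +
            (match acc.getLast? with
              | some lc => if pvAlnum [lc] then jc else []
              | none => []).length +
            (match (rest.drop (key.length - 1)).head? with
              | some nc => if pvAlnum [nc] then jc else []
              | none => []).length =
            (acc ++ (match acc.getLast? with
              | some lc => if pvAlnum [lc] then jc else []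
              | none => []) ++ val.toList ++ (match (rest.drop (key.length - 1)).head? with
              | some nc => if pvAlnum [nc] then jc else []
              | none => [])).length := by
          simp
          omega
        rw [hlenarg]
        simpa [List.append_assoc] using hrec

-- ===== VERDICT (by name: the statement is the Claim_ definition above) =====
theorem piecewise_translate_spec : Claim_equal_piecewise_translate := by
  intro in_list in_dict jws _hdom hpre
  unfold Spec_piecewise_translate piecewise_translate piecewise_translate_alt
  by_cases h : (in_list.toList.isEmpty || PySem.Chars.strIsspace in_list.toList) = true
  · simp only [h, if_true]
  · simp only [h, Bool.false_eq_true, if_false]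
    have hkeys : ∀ kv ∈ in_dict, kv.1 ≠ "" := hpre.resolve_right h
    exact congrArg String.ofList
      (pv_loop_eq in_dict hkeys (if jws then [' '] else [])
        (in_list.toList.length + 1) in_list.toList [] (by omega))
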